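-- pv_equiv track=rewrite | github.com/cvr-bhupalreddy/dsa-python-2025 | DSA/Arrays/18.ReversePairs.py | reverse_pairs_brute
-- ===== SOURCE A (Python) =====
-- def reverse_pairs_brute(nums):
--     n = len(nums)
--     count = 0
--     for i in range(n):
--         for j in range(i + 1, n):
--             if nums[i] > 2 * nums[j]:
--                 count += 1
--     return count
-- ===== SOURCE B (Python) =====
-- def reverse_pairs_brute(nums):
--     def sort_count(a):
--         if len(a) <= 1:
--             return a, 0
--         mid = len(a) // 2
--         left, cl = sort_count(a[:mid])
--         right, cr = sort_count(a[mid:])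
--         # count cross pairs (x from left half, y from right half, x > 2*y)
--         # using that both halves are sorted: j only ever advances
--         c = 0
--         j = 0
--         for x in left:
--             while j < len(right) and 2 * right[j] < x:
--                 j += 1
--             c += j
--         # merge the two sorted halves
--         merged = []
--         i = k = 0
--         while i < len(left) and k < len(right):
--             if left[i] <= right[k]:
--                 merged.append(left[i]); i += 1
--             else:
--                 merged.append(right[k]); k += 1
--         merged += left[i:]
--         merged += right[k:]
--         return merged, cl + cr + c
--     return sort_count(nums)[1]
-- ===== Notes on version B (the rewrite author's own statement) =====
-- stated objective: faster
-- what changed: Replaced the quadratic double loop with a merge-sort that counts cross reverse-pairs between sorted halves by a linear two-pointer sweep before merging.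
import Mathlib
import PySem

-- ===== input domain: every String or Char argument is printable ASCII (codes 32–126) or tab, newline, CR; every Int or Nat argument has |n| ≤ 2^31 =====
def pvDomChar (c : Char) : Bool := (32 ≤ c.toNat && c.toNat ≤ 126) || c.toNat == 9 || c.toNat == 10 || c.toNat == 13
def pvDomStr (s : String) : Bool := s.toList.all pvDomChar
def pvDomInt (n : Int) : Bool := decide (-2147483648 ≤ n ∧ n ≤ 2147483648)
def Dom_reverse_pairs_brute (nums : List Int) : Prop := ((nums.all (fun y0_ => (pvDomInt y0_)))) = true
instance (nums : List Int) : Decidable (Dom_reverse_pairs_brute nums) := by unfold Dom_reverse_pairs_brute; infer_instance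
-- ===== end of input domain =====

-- B replaces A's quadratic double loop by a merge sort that counts cross reverse-pairs
-- between the sorted halves with a linear two-pointer sweep (objective: faster, O(n log n)).

-- ===== PORT A =====
-- literal transliteration of the nested index loops of Source A
def reverse_pairs_brute (nums : List Int) : Int :=
  let n : Int := (nums.length : Int)
  (PySem.List.pyRange 0 n 1).foldl (fun count i =>
    (PySem.List.pyRange (i + 1) n 1).foldl (fun count j =>
      if PySem.List.pyGetD nums i 0 > 2 * PySem.List.pyGetD nums j 0 then count + 1 else count)
      count) 0

-- ===== PORT B =====
-- the 'for x in left: while j < len(right) and 2*right[j] < x: j += 1; c += j' sweep of Source B: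
-- the index j into `right` is represented by the not-yet-skipped suffix r (j elements consumed)
def pvGo (l r : List Int) (j : Int) : Int :=
  match l, r with
  | [], _ => 0
  | x :: l', b :: r' => if 2 * b < x then pvGo (x :: l') r' (j + 1) else j + pvGo l' (b :: r') j
  | _ :: l', [] => j + pvGo l' [] j
termination_by l.length + r.length
decreasing_by all_goals (simp only [List.length_cons]; omega)

-- the hand-written merge loop of Source B (indices i, k become the unconsumed suffixes)
def pvMerge (l r : List Int) : List Int :=
  match l, r with
  | [], r => r
  | l, [] => l
  | a :: l', b :: r' => if a ≤ b then a :: pvMerge l' (b :: r') else b :: pvMerge (a :: l') r'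
termination_by l.length + r.length

-- sort_count of Source B; n//2 on a nonnegative length is Nat division, and the slices
-- a[:mid], a[mid:] with 0 ≤ mid ≤ len are exactly take/drop
-- (PySem.List.slice_to_natCast / slice_from_natCast)
def pvSortCount (a : List Int) : List Int × Int :=
  if _h : a.length ≤ 1 then (a, 0)
  else
    let mid := a.length / 2
    let L := pvSortCount (a.take mid)
    let R := pvSortCount (a.drop mid)
    (pvMerge L.1 R.1, L.2 + R.2 + pvGo L.1 R.1 0)
termination_by a.length
decreasing_by all_goals simp_all; omega

def reverse_pairs_brute_alt (nums : List Int) : Int := (pvSortCount nums).2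

-- ===== PRECONDITION & SPEC =====
def Spec_reverse_pairs_brute (nums : List Int) (out : Int) : Prop := out = reverse_pairs_brute_alt nums
instance (nums : List Int) (out : Int) : Decidable (Spec_reverse_pairs_brute nums out) := by unfold Spec_reverse_pairs_brute; infer_instance

-- ===== CLAIM (what is proved, stated in full; the proofs are below) =====
def Claim_equal_reverse_pairs_brute : Prop := ∀ (nums : List Int), Dom_reverse_pairs_brute nums → Spec_reverse_pairs_brute nums (reverse_pairs_brute nums)

-- ===== LEMMAS AND PROOFS =====

-- number of y in r with x > 2*y, as an Int
def pvCountP (x : Int) (r : List Int) : Int := (r.countP (fun y => decide (2 * y < x)) : Int)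

-- the common specification: number of reverse pairs, by structural recursion
def pairCount : List Int → Int
  | [] => 0
  | x :: xs => pvCountP x xs + pairCount xs

-- number of cross pairs (x from l, y from r, x > 2*y)
def pvCross (l r : List Int) : Int := (l.map (fun x => pvCountP x r)).sum

theorem pvCountP_append (x : Int) (s r : List Int) :
    pvCountP x (s ++ r) = pvCountP x s + pvCountP x r := by
  simp [pvCountP, List.countP_append]

theorem pvCross_nil_left (r : List Int) : pvCross [] r = 0 := rfl

theorem pvCross_cons_left (x : Int) (l r : List Int) :
    pvCross (x :: l) r = pvCountP x r + pvCross l r := by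
  simp [pvCross]

theorem pairCount_append (l r : List Int) :
    pairCount (l ++ r) = pairCount l + pairCount r + pvCross l r := by
  induction l with
  | nil => simp [pairCount, pvCross_nil_left]
  | cons x l ih =>
      simp only [List.cons_append, pairCount, ih, pvCountP_append, pvCross_cons_left]
      ring

theorem pvCross_perm_left {l l' : List Int} (h : l.Perm l') (r : List Int) :
    pvCross l r = pvCross l' r :=
  (h.map _).sum_eq

theorem pvCross_perm_right (l : List Int) {r r' : List Int} (h : r.Perm r') :
    pvCross l r = pvCross l r' := by
  unfold pvCross
  congr 1
  refine List.map_congr_left (fun x _ => ?_)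
  simp [pvCountP, h.countP_eq]

theorem pvMerge_nil_left (r : List Int) : pvMerge [] r = r := by
  rw [pvMerge.eq_def]

theorem pvMerge_nil_right (l : List Int) : pvMerge l [] = l := by
  rw [pvMerge.eq_def]; cases l <;> rfl

theorem pvMerge_cons_cons (a b : Int) (l r : List Int) :
    pvMerge (a :: l) (b :: r) =
      if a ≤ b then a :: pvMerge l (b :: r) else b :: pvMerge (a :: l) r := by
  rw [pvMerge.eq_def]

theorem pvMerge_perm (l r : List Int) : (pvMerge l r).Perm (l ++ r) := by
  fun_induction pvMerge with
  | case1 r => simp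
  | case2 l _ => simp
  | case3 a l' b r' hle ih => simpa using ih.cons a
  | case4 a l' b r' hle ih =>
      exact (ih.cons b).trans List.perm_middle.symm

theorem pvMerge_pairwise {l r : List Int}
    (hl : l.Pairwise (· ≤ ·)) (hr : r.Pairwise (· ≤ ·)) :
    (pvMerge l r).Pairwise (· ≤ ·) := by
  induction l, r using pvMerge.induct with
  | case1 r => simpa [pvMerge_nil_left] using hr
  | case2 l _ => simpa [pvMerge_nil_right] using hl
  | case3 a l' b r' hle ih =>
      rw [pvMerge_cons_cons]
      simp only [if_pos hle]
      refine List.pairwise_cons.2 ⟨fun y hy => ?_, ih hl.of_cons hr⟩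
      have := (pvMerge_perm l' (b :: r')).mem_iff.1 hy
      rcases List.mem_append.1 this with h1 | h1
      · exact (List.pairwise_cons.1 hl).1 y h1
      · rcases List.mem_cons.1 h1 with rfl | h2
        · exact hle
        · exact hle.trans ((List.pairwise_cons.1 hr).1 y h2)
  | case4 a l' b r' hle ih =>
      rw [pvMerge_cons_cons]
      simp only [if_neg hle]
      have hba : b ≤ a := le_of_not_ge (fun h => hle (by omega))
      refine List.pairwise_cons.2 ⟨fun y hy => ?_, ih hl hr.of_cons⟩
      have := (pvMerge_perm (a :: l') r').mem_iff.1 hy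
      rcases List.mem_append.1 this with h1 | h1
      · rcases List.mem_cons.1 h1 with rfl | h2
        · exact hba
        · exact hba.trans ((List.pairwise_cons.1 hl).1 y h2)
      · exact (List.pairwise_cons.1 hr).1 y h1

theorem pvGo_nil (r : List Int) (j : Int) : pvGo [] r j = 0 := by
  rw [pvGo.eq_def]

theorem pvGo_cons_cons (x b : Int) (l r : List Int) (j : Int) :
    pvGo (x :: l) (b :: r) j =
      if 2 * b < x then pvGo (x :: l) r (j + 1) else j + pvGo l (b :: r) j := by
  rw [pvGo.eq_def]

theorem pvGo_cons_nil (x : Int) (l : List Int) (j : Int) :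
    pvGo (x :: l) [] j = j + pvGo l [] j := by
  rw [pvGo.eq_def]

theorem pvGo_aux (n : Nat) : ∀ (l r s : List Int), l.length + r.length ≤ n →
    l.Pairwise (· ≤ ·) → (s ++ r).Pairwise (· ≤ ·) →
    (∀ b ∈ s, ∀ x ∈ l, 2 * b < x) →
    pvGo l r (s.length : Int) = pvCross l (s ++ r) := by
  induction n with
  | zero =>
      intro l r s hn _ _ _
      cases l with
      | nil => simp [pvGo_nil, pvCross]
      | cons x l' => simp at hn
  | succ n ih =>
      intro l r s hn hl hr hs
      cases l with
      | nil => simp [pvGo_nil, pvCross]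
      | cons x l' =>
        have hcount : pvCountP x s = (s.length : Int) := by
          unfold pvCountP
          rw [List.countP_eq_length.2
            (fun b hb => decide_eq_true (hs b hb x (List.mem_cons_self)))]
        cases r with
        | nil =>
            rw [pvGo_cons_nil,
              ih l' [] s (by simp at hn ⊢; omega) hl.of_cons hr
                (fun b hb x' hx' => hs b hb x' (List.mem_cons_of_mem _ hx'))]
            rw [pvCross_cons_left]
            simp only [List.append_nil] at *
            rw [hcount]
        | cons b r' =>
            rw [pvGo_cons_cons]
            by_cases hb : 2 * b < x
            · rw [if_pos hb]
              have hs' : ∀ b' ∈ s ++ [b], ∀ x' ∈ x :: l', 2 * b' < x' := by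
                intro b' hb' x' hx'
                have hxx' : x ≤ x' := by
                  rcases List.mem_cons.1 hx' with rfl | h2
                  · exact le_refl x'
                  · exact (List.pairwise_cons.1 hl).1 x' h2
                rcases List.mem_append.1 hb' with h1 | h1
                · exact lt_of_lt_of_le (hs b' h1 x (List.mem_cons_self)) hxx'
                · have : b' = b := by simpa using h1
                  subst this
                  exact lt_of_lt_of_le hb hxx'
              have hr' : ((s ++ [b]) ++ r').Pairwise (· ≤ ·) := by
                simpa [List.append_assoc] using hr
              have hrec := ih (x :: l') r' (s ++ [b]) (by simp at hn ⊢; omega) hl hr' hs'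
              rw [show ((s.length : Int) + 1) = (((s ++ [b]).length : Nat) : Int) by simp]
              rw [hrec]
              simp [List.append_assoc]
            · rw [if_neg hb]
              have hr2 : (b :: r').Pairwise (· ≤ ·) :=
                hr.sublist (List.sublist_append_right s _)
              have hzero : pvCountP x (b :: r') = 0 := by
                unfold pvCountP
                rw [List.countP_eq_zero.2 ?_]
                · simp
                · intro b' hb'
                  have hbb' : b ≤ b' := by
                    rcases List.mem_cons.1 hb' with rfl | h2
                    · exact le_refl b'
                    · exact (List.pairwise_cons.1 hr2).1 b' h2
                  simp only [decide_eq_true_eq]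
                  omega
              rw [ih l' (b :: r') s (by simp at hn ⊢; omega) hl.of_cons hr
                (fun b' hb' x' hx' => hs b' hb' x' (List.mem_cons_of_mem _ hx'))]
              rw [pvCross_cons_left, pvCountP_append, hcount, hzero]
              ring

theorem pvGo_zero {l r : List Int} (hl : l.Pairwise (· ≤ ·)) (hr : r.Pairwise (· ≤ ·)) :
    pvGo l r 0 = pvCross l r := by
  have := pvGo_aux (l.length + r.length) l r [] le_rfl hl (by simpa using hr) (by simp)
  simpa using this

theorem pvSortCount_aux (n : Nat) : ∀ a : List Int, a.length ≤ n →
    (pvSortCount a).1.Perm a ∧ (pvSortCount a).1.Pairwise (· ≤ ·) ∧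
      (pvSortCount a).2 = pairCount a := by
  induction n with
  | zero =>
      intro a ha
      have : a = [] := List.eq_nil_of_length_eq_zero (by omega)
      subst this
      rw [pvSortCount]
      simp [pairCount]
  | succ n ih =>
      intro a ha
      rw [pvSortCount]
      by_cases h : a.length ≤ 1
      · rw [dif_pos h]
        match a, h with
        | [], _ => exact ⟨List.Perm.refl _, by simp, by simp [pairCount]⟩
        | [x], _ => exact ⟨List.Perm.refl _, by simp, by simp [pairCount, pvCountP]⟩
      · rw [dif_neg h]
        simp only []
        have hlen : 2 ≤ a.length := by omega
        have hmid1 : (a.take (a.length / 2)).length ≤ n := by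
          simp only [List.length_take]
          omega
        have hmid2 : (a.drop (a.length / 2)).length ≤ n := by
          simp only [List.length_drop]
          omega
        obtain ⟨hp1, hw1, hc1⟩ := ih (a.take (a.length / 2)) hmid1
        obtain ⟨hp2, hw2, hc2⟩ := ih (a.drop (a.length / 2)) hmid2
        refine ⟨?_, pvMerge_pairwise hw1 hw2, ?_⟩
        · exact (pvMerge_perm _ _).trans ((hp1.append hp2).trans
            (by rw [List.take_append_drop]))
        · rw [pvGo_zero hw1 hw2, hc1, hc2]
          have hcross : pvCross (pvSortCount (a.take (a.length / 2))).1
              (pvSortCount (a.drop (a.length / 2))).1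
              = pvCross (a.take (a.length / 2)) (a.drop (a.length / 2)) := by
            rw [pvCross_perm_left hp1, pvCross_perm_right _ hp2]
          rw [hcross]
          have := pairCount_append (a.take (a.length / 2)) (a.drop (a.length / 2))
          rw [List.take_append_drop] at this
          omega

theorem pvSortCount_spec (a : List Int) :
    (pvSortCount a).1.Perm a ∧ (pvSortCount a).1.Pairwise (· ≤ ·) ∧
      (pvSortCount a).2 = pairCount a :=
  pvSortCount_aux a.length a le_rfl

theorem foldl_countP (x : Int) (l : List Int) (acc : Int) :
    l.foldl (fun c y => if x > 2 * y then c + 1 else c) acc = acc + pvCountP x l := by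
  induction l generalizing acc with
  | nil => simp [pvCountP]
  | cons y t ih =>
      simp only [List.foldl_cons, ih]
      unfold pvCountP
      rw [List.countP_cons]
      by_cases h : x > 2 * y
      · rw [if_pos h, if_pos (by simpa using h)]
        push_cast
        ring
      · rw [if_neg h, if_neg (by simpa using h)]
        push_cast
        ring

theorem sum_range_eq_pairCount (xs : List Int) :
    ((List.range xs.length).map
      (fun k => pvCountP (xs.getD k 0) (xs.drop (k + 1)))).sum = pairCount xs := by
  induction xs with
  | nil => simp [pairCount]
  | cons x t ih =>
      rw [List.length_cons, List.range_succ_eq_map, List.map_cons, List.map_map]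
      have hmap : (List.map
          ((fun k => pvCountP ((x :: t).getD k 0) ((x :: t).drop (k + 1))) ∘ Nat.succ)
          (List.range t.length))
          = List.map (fun k => pvCountP (t.getD k 0) (t.drop (k + 1))) (List.range t.length) := by
        refine List.map_congr_left (fun k _ => ?_)
        simp [Function.comp]
      rw [List.sum_cons, hmap, ih]
      simp [pairCount]

theorem portA_eq_pairCount (nums : List Int) : reverse_pairs_brute nums = pairCount nums := by
  simp only [reverse_pairs_brute]
  rw [PySem.List.foldl_congr_mem _ _
    (fun (c : Int) (i : Int) => c + pvCountP (PySem.List.pyGetD nums i 0) (nums.drop (i + 1).toNat))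
    0 ?hcong]
  case hcong =>
    intro acc i hi
    have h0 : 0 ≤ i := (PySem.List.mem_pyRange_one.1 hi).1
    rw [PySem.List.foldl_pyRange_pyGetD' nums 0
      (fun c y => if PySem.List.pyGetD nums i 0 > 2 * y then c + 1 else c) acc (by omega)]
    exact foldl_countP _ _ _
  rw [PySem.List.foldl_add, PySem.List.pyRange_zero_nat, List.map_map]
  rw [List.map_congr_left (l := List.range nums.length)
      (g := fun k => pvCountP (nums.getD k 0) (nums.drop (k + 1)))
      (fun k _ => by
        have h1 : ((k : Int) + 1).toNat = k + 1 := by omega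
        simp [Function.comp, PySem.List.pyGetD_natCast, h1])]
  rw [sum_range_eq_pairCount]
  ring

-- ===== VERDICT (by name: the statement is the Claim_ definition above) =====
theorem reverse_pairs_brute_spec : Claim_equal_reverse_pairs_brute := by
  intro nums _
  show reverse_pairs_brute nums = reverse_pairs_brute_alt nums
  rw [portA_eq_pairCount, reverse_pairs_brute_alt, (pvSortCount_spec nums).2.2]
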